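-- pv_equiv track=rewrite | github.com/sweettuse/utils | utils/web/slack_api/text_to_emoji.py | _adjust_spaces
-- ===== SOURCE A (Python) =====
-- def _adjust_spaces(row):
--     """it's slightly less than 6 spaces per emoji, so we need to account for that"""
--     n = 0
--     for i, v in enumerate(row):
--         if _is_space(v):
--             n += 1
--             if not n % 4:
--                 row[i] = v[:-1]
--     return row
--
-- def _is_space(v):
--     return len(set(v)) == 1
-- ===== SOURCE B (Python) =====
-- def _adjust_spaces(row):
--     """it's slightly less than 6 spaces per emoji, so we need to account for that"""
--     idxs = [i for i, v in enumerate(row) if _is_space(v)]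
--     for i in idxs[3::4]:
--         row[i] = row[i][:-1]
--     return row
--
-- def _is_space(v):
--     return len(set(v)) == 1
-- ===== Notes on version B (the rewrite author's own statement) =====
-- stated objective: alternative
-- what changed: Replaces the interleaved count-and-trim loop (a running space counter checked with n % 4 inside the scan) with a two-phase shape: first collect the indices of all space cells in one comprehension, then trim exactly the cells at every fourth collected index via the stride slice idxs[3::4].
import Mathlib
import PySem

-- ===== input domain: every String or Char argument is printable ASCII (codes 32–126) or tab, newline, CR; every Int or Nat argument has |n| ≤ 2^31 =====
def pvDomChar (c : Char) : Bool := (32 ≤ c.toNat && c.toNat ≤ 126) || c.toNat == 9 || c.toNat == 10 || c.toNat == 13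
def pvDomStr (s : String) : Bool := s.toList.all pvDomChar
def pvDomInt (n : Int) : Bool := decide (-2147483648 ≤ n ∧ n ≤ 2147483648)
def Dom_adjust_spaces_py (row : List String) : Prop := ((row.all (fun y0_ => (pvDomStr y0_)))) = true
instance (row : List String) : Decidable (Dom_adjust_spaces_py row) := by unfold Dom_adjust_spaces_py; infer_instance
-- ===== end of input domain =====

-- B replaces A's interleaved count-and-trim scan (running space counter, n % 4 check inside the
-- loop) by collecting all space-cell indices first and then trimming the stride slice idxs[3::4];
-- same cost, different decomposition. (The Pythons mutate `row` in place; the theorem is about the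
-- return value, which both return.)


-- ===== PORT A =====
-- _is_space(v) = (len(set(v)) == 1)
def pvIsSpace (v : String) : Bool := (PySem.Set.ofList v.toList).length == 1
-- v[:-1]
def pvTrim (v : String) : String := PySem.Str.slice v none (some (-1))

def adjust_spaces_py (row : List String) : List String :=
  ((PySem.List.enumerate row 0).foldl
    (fun (st : List String × Int) iv =>
      if pvIsSpace iv.2 then
        if PySem.Int.mod (st.2 + 1) 4 == 0 then
          (PySem.List.pySetD st.1 iv.1 (pvTrim iv.2), st.2 + 1)
        else (st.1, st.2 + 1)
      else st)
    (row, 0)).1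

-- ===== PORT B =====
def adjust_spaces_py_alt (row : List String) : List String :=
  let idxs : List Int :=
    ((PySem.List.enumerate row 0).filter (fun iv => pvIsSpace iv.2)).map (fun iv => iv.1)
  ((PySem.List.slice? idxs (some 3) none 4).getD []).foldl
    (fun r i => PySem.List.pySetD r i (pvTrim (PySem.List.pyGetD r i ""))) row

-- ===== PRECONDITION & SPEC =====
def Spec_adjust_spaces_py (row : List String) (out : List String) : Prop := out = adjust_spaces_py_alt row
instance (row : List String) (out : List String) : Decidable (Spec_adjust_spaces_py row out) := by unfold Spec_adjust_spaces_py; infer_instance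

-- ===== CLAIM (what is proved, stated in full; the proofs are below) =====
def Claim_equal_adjust_spaces_py : Prop := ∀ (row : List String), Dom_adjust_spaces_py row → Spec_adjust_spaces_py row (adjust_spaces_py row)

-- ===== LEMMAS AND PROOFS =====

def pvChosen : Nat → Nat → List String → List (Nat × String)
  | _, _, [] => []
  | k, n, x :: xs =>
    if pvIsSpace x then
      if (n+1) % 4 = 0 then (k, x) :: pvChosen (k+1) (n+1) xs else pvChosen (k+1) (n+1) xs
    else pvChosen (k+1) n xs
def pvSetp (r : List String) (p : Nat × String) : List String := r.set p.1 (pvTrim p.2)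

theorem pvA_fold (xs : List String) : ∀ (k n : Nat) (r : List String),
    ((PySem.List.enumerate xs (k:Int)).foldl
      (fun (st : List String × Int) iv =>
        if pvIsSpace iv.2 then
          if PySem.Int.mod (st.2 + 1) 4 == 0 then
            (PySem.List.pySetD st.1 iv.1 (pvTrim iv.2), st.2 + 1)
          else (st.1, st.2 + 1)
        else st)
      (r, (n:Int))).1 = (pvChosen k n xs).foldl pvSetp r := by
  induction xs with
  | nil => intro k n r; simp [PySem.List.enumerate, pvChosen]
  | cons x xs ih =>
    intro k n r
    rw [PySem.List.enumerate_cons]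
    simp only [List.foldl_cons, pvChosen]
    by_cases hs : pvIsSpace x
    · have hmod : PySem.Int.mod ((n:Int) + 1) 4 = (((n+1) % 4 : Nat) : Int) := by
        have := PySem.Int.mod_natCast (n+1) 4
        push_cast at this ⊢
        omega
      by_cases h4 : (n+1) % 4 = 0
      · simp only [hs, if_true, hmod, h4, Nat.cast_zero, beq_self_eq_true]
        have hk1 : (k:Int) + 1 = ((k+1 : Nat) : Int) := by push_cast; ring
        have hn1 : (n:Int) + 1 = ((n+1 : Nat) : Int) := by push_cast; ring
        simp only [hn1, hk1]
        rw [ih (k+1) (n+1)]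
        simp [pvSetp, PySem.List.pySetD_natCast]
      · simp only [hs, if_true, hmod]
        rw [if_neg (by simp; omega)]
        have hk1 : (k:Int) + 1 = ((k+1 : Nat) : Int) := by push_cast; ring
        have hn1 : (n:Int) + 1 = ((n+1 : Nat) : Int) := by push_cast; ring
        simp only [hn1, hk1]
        rw [ih (k+1) (n+1)]
        simp [h4]
    · simp only [hs, if_false, Bool.false_eq_true]
      have hk1 : (k:Int) + 1 = ((k+1 : Nat) : Int) := by push_cast; ring
      simp only [hk1]
      exact ih (k+1) n r

def pvEvery4 {α : Type} : List α → List α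
  | [] => []
  | x :: xs => x :: pvEvery4 (xs.drop 3)
termination_by l => l.length
decreasing_by simp

def pvSpaces : Nat → List String → List (Nat × String)
  | _, [] => []
  | k, x :: xs => if pvIsSpace x then (k, x) :: pvSpaces (k+1) xs else pvSpaces (k+1) xs

theorem pvB_filter (xs : List String) : ∀ (k : Nat),
    (PySem.List.enumerate xs (k:Int)).filter (fun iv => pvIsSpace iv.2)
      = (pvSpaces k xs).map (fun p => ((p.1:Int), p.2)) := by
  induction xs with
  | nil => intro k; simp [PySem.List.enumerate, pvSpaces]
  | cons x xs ih =>
    intro k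
    rw [PySem.List.enumerate_cons]
    have hk1 : (k:Int) + 1 = ((k+1 : Nat) : Int) := by push_cast; ring
    rw [List.filter_cons, hk1, ih (k+1)]
    by_cases hs : pvIsSpace x <;>
      simp only [pvSpaces, hs, if_true, if_false, Bool.false_eq_true, List.map_cons]

theorem pvChosen_eq (xs : List String) : ∀ (k n : Nat),
    pvChosen k n xs = pvEvery4 ((pvSpaces k xs).drop (3 - n % 4)) := by
  induction xs with
  | nil => intro k n; simp [pvChosen, pvSpaces, pvEvery4]
  | cons x xs ih =>
    intro k n
    by_cases hs : pvIsSpace x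
    · by_cases h4 : (n+1) % 4 = 0
      · have hn3 : n % 4 = 3 := by omega
        simp only [pvChosen, pvSpaces, hs, if_true, h4, hn3]
        rw [ih (k+1) (n+1)]
        simp [pvEvery4, h4]
      · have h1 : 3 - n % 4 = (3 - (n+1) % 4) + 1 := by omega
        simp only [pvChosen, pvSpaces, hs, if_true, if_neg h4, h1, List.drop_succ_cons]
        exact ih (k+1) (n+1)
    · simp only [pvChosen, pvSpaces, hs, if_false, Bool.false_eq_true]
      exact ih (k+1) n

theorem pvEvery4_map {α β : Type} (f : α → β) (l : List α) :
    pvEvery4 (l.map f) = (pvEvery4 l).map f := by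
  induction l using pvEvery4.induct with
  | case1 => simp [pvEvery4]
  | case2 x xs ih =>
    simp only [List.map_cons, pvEvery4, List.map_drop] at *
    rw [ih]

theorem pvEvery4_sublist {α : Type} (l : List α) : (pvEvery4 l).Sublist l := by
  induction l using pvEvery4.induct with
  | case1 => simp [pvEvery4]
  | case2 x xs ih =>
    rw [pvEvery4]
    exact (ih.trans (List.drop_sublist 3 xs)).cons₂ x

theorem pvSpaces_mem (xs : List String) : ∀ (k : Nat) (p : Nat × String),
    p ∈ pvSpaces k xs → k ≤ p.1 ∧ xs[p.1 - k]? = some p.2 := by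
  induction xs with
  | nil => intro k p h; simp [pvSpaces] at h
  | cons x xs ih =>
    intro k p h
    by_cases hs : pvIsSpace x <;> simp only [pvSpaces, hs, if_true, if_false, Bool.false_eq_true, List.mem_cons] at h
    · rcases h with h | h
      · subst h; simp
      · rcases ih (k+1) p h with ⟨h1, h2⟩
        refine ⟨by omega, ?_⟩
        have : p.1 - k = (p.1 - (k+1)) + 1 := by omega
        rw [this, List.getElem?_cons_succ]
        exact h2
    · rcases ih (k+1) p h with ⟨h1, h2⟩
      refine ⟨by omega, ?_⟩
      have : p.1 - k = (p.1 - (k+1)) + 1 := by omega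
      rw [this, List.getElem?_cons_succ]
      exact h2

theorem pvSpaces_pairwise (xs : List String) : ∀ (k : Nat),
    (pvSpaces k xs).Pairwise (fun a b => a.1 < b.1) := by
  induction xs with
  | nil => intro k; simp [pvSpaces]
  | cons x xs ih =>
    intro k
    by_cases hs : pvIsSpace x <;> simp only [pvSpaces, hs, if_true, if_false, Bool.false_eq_true]
    · refine List.Pairwise.cons ?_ (ih (k+1))
      intro p hp
      have := (pvSpaces_mem xs (k+1) p hp).1
      simpa using by omega
    · exact ih (k+1)

theorem pvB_fold (ps : List (Nat × String)) : ∀ (r : List String),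
    ps.Pairwise (fun a b => a.1 < b.1) →
    (∀ p ∈ ps, r[p.1]? = some p.2) →
    (ps.map (fun p => ((p.1:Int)))).foldl
      (fun r i => PySem.List.pySetD r i (pvTrim (PySem.List.pyGetD r i ""))) r
      = ps.foldl pvSetp r := by
  induction ps with
  | nil => intro r _ _; rfl
  | cons p ps ih =>
    intro r hpw hget
    rcases List.pairwise_cons.mp hpw with ⟨hlt, hpw'⟩
    have hp : r[p.1]? = some p.2 := hget p (by simp)
    have hlen : p.1 < r.length := by
      by_contra h
      rw [List.getElem?_eq_none (by omega)] at hp; simp at hp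
    simp only [List.map_cons, List.foldl_cons]
    have hgd : PySem.List.pyGetD r (p.1:Int) "" = p.2 := by
      rw [PySem.List.pyGetD_natCast]
      simp [List.getD, hp]
    rw [hgd]
    rw [show PySem.List.pySetD r (p.1:Int) (pvTrim p.2) = r.set p.1 (pvTrim p.2) from by simp]
    refine ih (r.set p.1 (pvTrim p.2)) hpw' ?_
    intro q hq
    rw [List.getElem?_set_ne (by have := hlt q hq; omega)]
    exact hget q (by simp [hq])

theorem pvFilterMapEvery4 {α : Type} : ∀ (m : List α) (c : Nat), c = (m.length + 3)/4 →
    List.filterMap (fun k => m[4*k]?) (List.range c) = pvEvery4 m := by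
  intro m
  induction m using pvEvery4.induct with
  | case1 => intro c hc; simp at hc; simp [pvEvery4]
  | case2 x xs ih =>
    intro c hc
    have hc' : c = (xs.length / 4) + 1 := by simp at hc; omega
    subst hc'
    rw [List.range_succ_eq_map, List.filterMap_cons, List.filterMap_map]
    simp only [Nat.mul_zero, List.getElem?_cons_zero]
    rw [pvEvery4]
    congr 1
    have hstep : (fun k => (x :: xs)[4*k]?) ∘ Nat.succ = fun k => (xs.drop 3)[4*k]? := by
      funext k
      simp only [Function.comp]
      rw [show 4 * (k+1) = 4 + 4*k from by ring]
      rw [show (x :: xs)[4 + 4*k]? = ((x :: xs).drop 4)[4*k]? from List.getElem?_drop.symm]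
      rfl
    rw [hstep]
    exact ih _ (by rw [List.length_drop]; omega)

theorem pvSlice34 {α : Type} (l : List α) :
    PySem.List.slice? l (some 3) none 4 = some (pvEvery4 (l.drop 3)) := by
  rw [PySem.List.slice?]
  simp only [if_neg (by norm_num : ¬ (4:Int) = 0)]
  rw [PySem.List.sliceIndices]
  norm_num
  by_cases h : 3 < l.length
  · rw [if_pos h]
    rw [show min (3:Int) l.length = 3 from by omega]
    have hcount : (((l.length:Int) - 3 + 4 - 1) / 4).toNat = ((l.drop 3).length + 3)/4 := by
      rw [List.length_drop]
      omega
    rw [hcount]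
    rw [← pvFilterMapEvery4 (l.drop 3) _ rfl]
    congr 1
    funext k
    rw [show ((3:Int) + 4 * (k:Nat)).toNat = 3 + 4*k from by omega]
    exact List.getElem?_drop.symm
  · rw [if_neg h]
    rw [List.drop_eq_nil_of_le (by omega)]
    simp [pvEvery4]

-- ===== VERDICT (by name: the statement is the Claim_ definition above) =====
theorem adjust_spaces_py_spec : Claim_equal_adjust_spaces_py := by
  intro row _
  unfold Spec_adjust_spaces_py adjust_spaces_py adjust_spaces_py_alt
  have hsub : (pvChosen 0 0 row).Sublist (pvSpaces 0 row) := by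
    rw [pvChosen_eq]
    exact (pvEvery4_sublist _).trans (List.drop_sublist _ _)
  have hA := pvA_fold row 0 0 row
  have hB := pvB_filter row 0
  simp only [Nat.cast_zero] at hA hB
  rw [hA, hB, List.map_map]
  have hcomp : ((fun iv : Int × String => iv.1) ∘ (fun p : Nat × String => ((p.1:Int), p.2)))
      = fun p : Nat × String => (p.1:Int) := rfl
  simp only [hcomp, pvSlice34, Option.getD_some]
  rw [← List.map_drop, pvEvery4_map]
  have hch := pvChosen_eq row 0 0
  norm_num at hch
  rw [← hch]
  refine (pvB_fold (pvChosen 0 0 row) row ?_ ?_).symm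
  · exact (pvSpaces_pairwise row 0).sublist hsub
  · intro p hp
    have := (pvSpaces_mem row 0 p (hsub.subset hp)).2
    simpa using this
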